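-- pv_equiv track=rewrite | github.com/Xskullibur/Diploma-Data-Structures-and-Algorithm | Practice/Practical 6/Recursive_Rearrangement.py | recsort2
-- ===== SOURCE A (Python) =====
-- def recsort2(data, low, high):
--
--     if(low < high):
--
--         if(data[high] % 2 == 0):
--             temp = data[high]
--             data[high] = data[low]
--             data[low] = temp
--
--             return recsort2(data, low + 1, high)
--         else:
--             return recsort2(data, low, high - 1)
--
--     else:
--         return data
-- ===== SOURCE B (Python) =====
-- def recsort2(data, low, high):
--     if low >= high:
--         return data
--     l, h = low, high
--     c = data[h]
--     front, back = [], []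
--     while l < h:
--         if c % 2 == 0:
--             front.append(c)
--             c = data[l]
--             l += 1
--         else:
--             back.append(c)
--             h -= 1
--             c = data[h]
--     data[low:high + 1] = front + [c] + back[::-1]
--     return data
-- ===== Notes on version B (the rewrite author's own statement) =====
-- stated objective: alternative
-- what changed: The recursive in-place swap partition is replaced by an iterative two-pointer scan over the original list that collects the front evens and the fixed back odds into separate accumulator lists and rebuilds the segment with one slice assignment.
-- outside the precondition, e.g. on recsort2([2, 1], -2, 1): A returns [1, 2], B returns [2, 2, 1, 1]
import Mathlib
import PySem

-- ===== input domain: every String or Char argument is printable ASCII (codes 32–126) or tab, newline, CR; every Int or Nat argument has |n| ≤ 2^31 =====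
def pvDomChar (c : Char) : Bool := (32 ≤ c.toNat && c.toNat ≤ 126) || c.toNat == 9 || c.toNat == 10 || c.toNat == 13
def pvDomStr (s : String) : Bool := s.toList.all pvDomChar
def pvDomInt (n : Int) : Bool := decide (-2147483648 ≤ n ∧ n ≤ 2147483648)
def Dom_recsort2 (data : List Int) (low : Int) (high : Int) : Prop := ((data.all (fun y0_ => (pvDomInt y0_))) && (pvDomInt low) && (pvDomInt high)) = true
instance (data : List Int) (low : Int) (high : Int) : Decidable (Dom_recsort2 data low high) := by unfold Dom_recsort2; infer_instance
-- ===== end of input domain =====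

-- B replaces A's recursive in-place swap partition by an iterative two-pointer scan over the
-- original list that accumulates the front evens and the fixed back odds in separate lists and
-- rebuilds the segment with one slice assignment (same return value; both Pythons mutate `data`
-- to the returned content).

-- ===== PORT A =====
def recsort2 (data : List Int) (low : Int) (high : Int) : List Int :=
  if low < high then
    if PySem.Int.mod (PySem.List.pyGetD data high 0) 2 == 0 then
      let temp := PySem.List.pyGetD data high 0
      let d1 := PySem.List.pySetD data high (PySem.List.pyGetD data low 0)
      let d2 := PySem.List.pySetD d1 low temp
      recsort2 d2 (low + 1) high
    else
      recsort2 data low (high - 1)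
  else data
termination_by (high - low).toNat
decreasing_by
  · omega
  · omega

-- ===== PORT B =====
-- the `while l < h` loop of Source B, state (l, h, c, front, back); returns (front, c, back)
def recsort2Loop (data : List Int) (l : Int) (h : Int) (c : Int)
    (front : List Int) (back : List Int) : List Int × Int × List Int :=
  if l < h then
    if PySem.Int.mod c 2 == 0 then
      recsort2Loop data (l + 1) h (PySem.List.pyGetD data l 0) (front ++ [c]) back
    else
      recsort2Loop data l (h - 1) (PySem.List.pyGetD data (h - 1) 0) front (back ++ [c])
  else (front, c, back)
termination_by (h - l).toNat
decreasing_by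
  · omega
  · omega

def recsort2_alt (data : List Int) (low : Int) (high : Int) : List Int :=
  if low ≥ high then data
  else
    let r := recsort2Loop data low high (PySem.List.pyGetD data high 0) [] []
    PySem.List.slice data none (some low)
      ++ (r.1 ++ [r.2.1] ++ r.2.2.reverse)
      ++ PySem.List.slice data (some (high + 1)) none

-- ===== PRECONDITION & SPEC =====
-- Pre_ excludes calls with an out-of-range `high` (A raises IndexError) and calls with a negative
-- `low` bound, on which A still returns a value via Python's negative-index wraparound (the two
-- pointers then address overlapping slots) while B's slice-assignment rebuild misbehaves or raises.
def Pre_recsort2 (data : List Int) (low : Int) (high : Int) : Prop :=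
  low < high → (0 ≤ low ∧ high < (data.length : Int))
instance (data : List Int) (low : Int) (high : Int) : Decidable (Pre_recsort2 data low high) := by
  unfold Pre_recsort2; infer_instance

def pvWitness_recsort2 : List Int × Int × Int := ([2, 1, 4], 0, 2)

def Spec_recsort2 (data : List Int) (low : Int) (high : Int) (out : List Int) : Prop := out = recsort2_alt data low high
instance (data : List Int) (low : Int) (high : Int) (out : List Int) : Decidable (Spec_recsort2 data low high out) := by unfold Spec_recsort2; infer_instance

-- ===== CLAIM (what is proved, stated in full; the proofs are below) =====
def Claim_equal_recsort2 : Prop := ∀ (data : List Int) (low : Int) (high : Int), Dom_recsort2 data low high → Pre_recsort2 data low high → Spec_recsort2 data low high (recsort2 data low high)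

-- ===== LEMMAS AND PROOFS =====

-- the parity test both ports perform
def evenb (c : Int) : Bool := PySem.Int.mod c 2 == 0

-- functional spec of the rearrangement of one segment
def partA : List Int → List Int
  | [] => []
  | [a] => [a]
  | x :: m1 :: rest =>
      let y := (m1 :: rest).getLast (by simp)
      let mid := (m1 :: rest).dropLast
      if evenb y then y :: partA (mid ++ [x]) else partA (x :: mid) ++ [y]
termination_by seg => seg.length
decreasing_by
  · simp
  · simp

lemma partA_concat (x : Int) (mid : List Int) (y : Int) :
    partA (x :: (mid ++ [y])) = if evenb y then y :: partA (mid ++ [x]) else partA (x :: mid) ++ [y] := by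
  cases mid with
  | nil => simp [partA]
  | cons m ms =>
      conv_lhs => rw [show x :: ((m :: ms) ++ [y]) = x :: m :: (ms ++ [y]) from by simp, partA]
      simp only [show m :: (ms ++ [y]) = (m :: ms) ++ [y] from by simp,
        List.getLast_concat, List.dropLast_concat]

lemma getD_mid (P mid : List Int) (z : Int) (S : List Int) :
    (P ++ mid ++ z :: S).getD (P.length + mid.length) 0 = z := by
  induction P with
  | nil =>
      induction mid with
      | nil => simp
      | cons m ms ih => simpa using ih
  | cons p ps ih =>
      have : (p :: ps).length + mid.length = (ps.length + mid.length) + 1 := by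
        simp; omega
      rw [this]
      simpa using ih

lemma set_mid (P mid : List Int) (z v : Int) (S : List Int) :
    (P ++ mid ++ z :: S).set (P.length + mid.length) v = P ++ mid ++ v :: S := by
  induction P with
  | nil =>
      induction mid with
      | nil => simp
      | cons m ms ih => simpa using ih
  | cons p ps ih =>
      have : (p :: ps).length + mid.length = (ps.length + mid.length) + 1 := by
        simp; omega
      rw [this]
      simpa using ih

lemma recsortA_seg (n : Nat) (P seg S : List Int) (hlen : seg.length = n + 1) :
    recsort2 (P ++ seg ++ S) (P.length : Int) ((P.length : Int) + n) = P ++ partA seg ++ S := by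
  induction n generalizing P seg S with
  | zero =>
      obtain ⟨a, rfl⟩ : ∃ a, seg = [a] := by
        cases seg with
        | nil => simp at hlen
        | cons a t =>
            cases t with
            | nil => exact ⟨a, rfl⟩
            | cons b u => simp at hlen
      rw [recsort2]
      simp [partA]
  | succ n ih =>
      obtain ⟨x, t, rfl⟩ : ∃ x t, seg = x :: t := by
        cases seg with
        | nil => simp at hlen
        | cons x t => exact ⟨x, t, rfl⟩
      rcases t.eq_nil_or_concat with rfl | ⟨mid, y, rfl⟩
      · simp at hlen
      simp only [List.concat_eq_append] at hlen ⊢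
      have hmid : mid.length = n := by simp at hlen; omega
      have hdata : P ++ x :: (mid ++ [y]) ++ S = P ++ (x :: mid) ++ (y :: S) := by simp
      have hget_high : PySem.List.pyGetD (P ++ x :: (mid ++ [y]) ++ S) ((P.length : Int) + (↑n + 1)) 0 = y := by
        have h1 : (P.length : Int) + (↑n + 1) = ((P.length + (x :: mid).length : Nat) : Int) := by
          simp only [List.length_cons, hmid]; push_cast; ring
        rw [h1, PySem.List.pyGetD_natCast, hdata]
        simpa using getD_mid P (x :: mid) y S
      have hget_low : PySem.List.pyGetD (P ++ x :: (mid ++ [y]) ++ S) ((P.length : Int)) 0 = x := by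
        have h2 : P ++ x :: (mid ++ [y]) ++ S = P ++ ([] : List Int) ++ (x :: (mid ++ y :: S)) := by simp
        rw [show ((P.length : Int)) = ((P.length + ([] : List Int).length : Nat) : Int) by simp,
          PySem.List.pyGetD_natCast, h2]
        simpa using getD_mid P [] x (mid ++ y :: S)
      push_cast
      rw [recsort2]
      rw [if_pos (show (P.length : Int) < (P.length : Int) + (↑n + 1) by omega)]
      rw [hget_high, hget_low]
      by_cases he : evenb y
      · rw [show (PySem.Int.mod y 2 == 0) = true from he, if_pos rfl]
        have hset1 : PySem.List.pySetD (P ++ x :: (mid ++ [y]) ++ S) ((P.length : Int) + (↑n + 1)) x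
            = P ++ (x :: mid) ++ (x :: S) := by
          have h1 : (P.length : Int) + (↑n + 1) = ((P.length + (x :: mid).length : Nat) : Int) := by
            simp only [List.length_cons, hmid]; push_cast; ring
          rw [h1, PySem.List.pySetD_natCast, hdata]
          exact set_mid P (x :: mid) y x S
        have hset2 : PySem.List.pySetD (P ++ (x :: mid) ++ (x :: S)) ((P.length : Int)) y
            = P ++ ([] : List Int) ++ (y :: (mid ++ x :: S)) := by
          rw [show ((P.length : Int)) = ((P.length + ([] : List Int).length : Nat) : Int) by simp,
            PySem.List.pySetD_natCast]
          have h2 : P ++ (x :: mid) ++ (x :: S) = P ++ ([] : List Int) ++ (x :: (mid ++ x :: S)) := by simp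
          rw [h2]
          exact set_mid P [] x y (mid ++ x :: S)
        simp only [hset1, hset2]
        have h3 : P ++ ([] : List Int) ++ (y :: (mid ++ x :: S)) = (P ++ [y]) ++ (mid ++ [x]) ++ S := by simp
        have h4 : ((P.length : Int)) + 1 = (((P ++ [y]).length : Nat) : Int) := by simp
        have h5 : ((P.length : Int)) + (↑n + 1) = (((P ++ [y]).length : Nat) : Int) + ↑n := by
          simp; push_cast; ring
        rw [h3, h4, h5, ih (P ++ [y]) (mid ++ [x]) S (by simp [hmid])]
        rw [partA_concat x mid y, if_pos he]
        simp
      · rw [show (PySem.Int.mod y 2 == 0) = (false : Bool) from by simpa [evenb] using he]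
        simp only [Bool.false_eq_true, if_false]
        rw [show ((P.length : Int)) + (↑n + 1) - 1 = ((P.length : Int)) + ↑n by ring]
        rw [hdata, ih P (x :: mid) (y :: S) (by simp [hmid])]
        rw [partA_concat x mid y, if_neg he]
        simp

-- the assembled value front ++ [c] ++ back[::-1] of a loop result
def asm (r : List Int × Int × List Int) : List Int := r.1 ++ [r.2.1] ++ r.2.2.reverse

lemma loopB_seg (n : Nat) (P mid : List Int) (c : Int) (S front back : List Int)
    (hlen : mid.length = n) :
    asm (recsort2Loop (P ++ mid ++ S) (P.length : Int) ((P.length : Int) + n) c front back)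
    = front ++ partA (mid ++ [c]) ++ back.reverse := by
  induction n generalizing P mid c S front back with
  | zero =>
      obtain rfl : mid = [] := List.length_eq_zero_iff.mp hlen
      rw [recsort2Loop, if_neg (by omega)]
      simp [asm, partA]
  | succ n ih =>
      obtain ⟨m0, rest, rfl⟩ : ∃ m0 rest, mid = m0 :: rest := by
        cases mid with
        | nil => simp at hlen
        | cons m0 rest => exact ⟨m0, rest, rfl⟩
      rw [recsort2Loop, if_pos (show (P.length : Int) < (P.length : Int) + ↑(n + 1) by push_cast; omega)]
      by_cases he : evenb c
      · rw [show (PySem.Int.mod c 2 == 0) = true from he, if_pos rfl]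
        have hget : PySem.List.pyGetD (P ++ (m0 :: rest) ++ S) ((P.length : Int)) 0 = m0 := by
          rw [show ((P.length : Int)) = ((P.length + ([] : List Int).length : Nat) : Int) by simp,
            PySem.List.pyGetD_natCast,
            show P ++ (m0 :: rest) ++ S = P ++ ([] : List Int) ++ (m0 :: (rest ++ S)) by simp]
          simpa using getD_mid P [] m0 (rest ++ S)
        rw [hget]
        have h1 : P ++ (m0 :: rest) ++ S = (P ++ [m0]) ++ rest ++ S := by simp
        have h2 : ((P.length : Int)) + 1 = (((P ++ [m0]).length : Nat) : Int) := by simp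
        have h3 : ((P.length : Int)) + ↑(n + 1) = (((P ++ [m0]).length : Nat) : Int) + ↑n := by
          simp; push_cast; ring
        rw [h1, h2, h3, ih (P ++ [m0]) rest m0 S (front ++ [c]) back (by simpa using hlen)]
        rw [show (m0 :: rest) ++ [c] = m0 :: (rest ++ [c]) by simp, partA_concat m0 rest c, if_pos he]
        simp
      · rw [show (PySem.Int.mod c 2 == 0) = (false : Bool) from by simpa [evenb] using he]
        simp only [Bool.false_eq_true, if_false]
        rcases (m0 :: rest).eq_nil_or_concat with habs | ⟨ms, mL, hk⟩
        · simp at habs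
        have hms : ms.length = n := by
          have hL := congrArg List.length hk
          simp at hL hlen
          omega
        have hdata : P ++ (m0 :: rest) ++ S = P ++ ms ++ (mL :: S) := by
          rw [hk]; simp
        have hgetH : PySem.List.pyGetD (P ++ (m0 :: rest) ++ S) ((P.length : Int) + ↑(n + 1) - 1) 0 = mL := by
          rw [show ((P.length : Int)) + ↑(n + 1) - 1 = ((P.length + ms.length : Nat) : Int) by
              push_cast [hms]; ring,
            PySem.List.pyGetD_natCast, hdata]
          simpa using getD_mid P ms mL S
        rw [hgetH]
        have h4 : ((P.length : Int)) + ↑(n + 1) - 1 = ((P.length : Int)) + ↑n := by push_cast; ring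
        rw [h4, hdata, ih P ms mL (mL :: S) front (back ++ [c]) hms]
        rw [show (m0 :: rest) ++ [c] = m0 :: (rest ++ [c]) by simp, partA_concat m0 rest c, if_neg he]
        rw [show ms ++ [mL] = m0 :: rest from by rw [hk]; simp]
        simp

lemma recsort2_eq_alt (data : List Int) (low high : Int)
    (hpre : low < high → (0 ≤ low ∧ high < (data.length : Int))) :
    recsort2 data low high = recsort2_alt data low high := by
  by_cases hlt : low < high
  · obtain ⟨h0, hlen⟩ := hpre hlt
    obtain ⟨a, rfl⟩ : ∃ a : Nat, low = (a : Int) := ⟨low.toNat, (Int.toNat_of_nonneg h0).symm⟩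
    obtain ⟨b, rfl⟩ : ∃ b : Nat, high = (b : Int) := ⟨high.toNat, (Int.toNat_of_nonneg (by omega)).symm⟩
    have hab : a < b := by exact_mod_cast hlt
    have hblen : b < data.length := by exact_mod_cast hlen
    have hdata0 : data = data.take a ++ (data.drop a).take (b - a + 1) ++ (data.drop a).drop (b - a + 1) := by
      rw [List.append_assoc, List.take_append_drop, List.take_append_drop]
    set P := data.take a with hP
    set seg := (data.drop a).take (b - a + 1) with hseg
    set S := (data.drop a).drop (b - a + 1) with hS
    have hPl : P.length = a := by rw [hP, List.length_take]; omega
    have hsegl : seg.length = b - a + 1 := by simp [hseg]; omega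
    have hSd : S = data.drop (b + 1) := by rw [hS, List.drop_drop]; congr 1; omega
    -- seg = x :: (mid ++ [y])
    obtain ⟨x, t, hxt⟩ : ∃ x t, seg = x :: t := by
      cases hc : seg with
      | nil => rw [hc] at hsegl; simp at hsegl
      | cons x t => exact ⟨x, t, rfl⟩
    rcases t.eq_nil_or_concat with rfl | ⟨mid, y, hk⟩
    · rw [hxt] at hsegl; simp at hsegl; omega
    simp only [List.concat_eq_append] at hk
    rw [hk] at hxt
    have hmidl : mid.length = b - a - 1 := by
      rw [hxt] at hsegl; simp at hsegl; omega
    have hdata : data = P ++ (x :: (mid ++ [y])) ++ S := by rw [← hxt]; exact hdata0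
    have hdata2 : data = P ++ (x :: mid) ++ (y :: S) := by rw [hdata]; simp
    -- A side
    have hA : recsort2 data (a : Int) (b : Int) = P ++ partA seg ++ S := by
      have h1 := recsortA_seg (b - a) P seg S (by omega)
      rw [← hdata0] at h1
      rw [show ((a : Nat) : Int) = ((P.length : Nat) : Int) by rw [hPl],
        show ((b : Nat) : Int) = ((P.length : Nat) : Int) + ((b - a : Nat) : Int) by rw [hPl]; omega]
      exact h1
    rw [hA]
    -- B side
    simp only [recsort2_alt]
    rw [if_neg (by omega : ¬ ((a : Nat) : Int) ≥ ((b : Nat) : Int))]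
    have hc0 : PySem.List.pyGetD data ((b : Nat) : Int) 0 = y := by
      rw [show ((b : Nat) : Int) = ((P.length + (x :: mid).length : Nat) : Int) by
          simp [hPl]; omega,
        PySem.List.pyGetD_natCast, hdata2]
      simpa using getD_mid P (x :: mid) y S
    rw [hc0]
    have hloop := loopB_seg (b - a) P (x :: mid) y (y :: S) [] [] (by simp; omega)
    rw [← hdata2] at hloop
    rw [show ((P.length : Nat) : Int) = ((a : Nat) : Int) by rw [hPl]] at hloop
    rw [show ((a : Nat) : Int) + ((b - a : Nat) : Int) = ((b : Nat) : Int) by omega] at hloop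
    have hmidfront : ∀ r : List Int × Int × List Int,
        r.1 ++ [r.2.1] ++ r.2.2.reverse = asm r := fun _ => rfl
    rw [hmidfront (recsort2Loop data ((a : Nat) : Int) ((b : Nat) : Int) y [] [])]
    rw [hloop]
    rw [PySem.List.slice_to_natCast,
      show ((b : Nat) : Int) + 1 = ((b + 1 : Nat) : Int) by push_cast; ring,
      PySem.List.slice_from_natCast]
    rw [show x :: mid ++ [y] = seg from by rw [hxt]; simp]
    rw [← hP, ← hSd]
    simp
  · rw [recsort2, if_neg hlt]
    simp only [recsort2_alt]
    rw [if_pos (by omega : low ≥ high)]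

-- ===== VERDICT (by name: the statement is the Claim_ definition above) =====
theorem recsort2_spec : Claim_equal_recsort2 := by
  intro data low high _hdom hpre
  unfold Spec_recsort2
  exact recsort2_eq_alt data low high hpre
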